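-- pv_equiv track=rewrite | github.com/TrasuaOzone/bando | bot.py | pick_best_model
-- ===== SOURCE A (Python) =====
-- from typing import List, Dict, Optional
--
-- PRIORITY_KEYWORDS = ["llama-4", "llama-3", "mistral", "gemma", "openchat", "instruct", "chat"]
--
-- BLACKLIST         = ["embed", "embedding", "vision", "whisper", "tts", "audio", "moderation"]
--
-- def pick_best_model(model_ids: List[str]) -> Optional[str]:
--     filtered = [mid for mid in model_ids if not any(b in mid.lower() for b in BLACKLIST)]
--     if not filtered:
--         filtered = model_ids
--     for kw in PRIORITY_KEYWORDS:
--         for mid in filtered: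
--             if kw in mid.lower():
--                 return mid
--     return filtered[0] if filtered else None
-- ===== SOURCE B (Python) =====
-- from typing import List, Optional
--
-- PRIORITY_KEYWORDS = ["llama-4", "llama-3", "mistral", "gemma", "openchat", "instruct", "chat"]
--
-- BLACKLIST = ["embed", "embedding", "vision", "whisper", "tts", "audio", "moderation"]
--
-- def pick_best_model(model_ids: List[str]) -> Optional[str]:
--     # single pass: keep the first minimal-rank candidate among non-blacklisted
--     # ids, and among all ids (fallback when every id is blacklisted)
--     best_clean = None  # (rank, mid), first occurrence wins ties
--     best_all = None
--     for mid in model_ids: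
--         low = mid.lower()
--         r = next((i for i, kw in enumerate(PRIORITY_KEYWORDS) if kw in low),
--                  len(PRIORITY_KEYWORDS))
--         if best_all is None or r < best_all[0]:
--             best_all = (r, mid)
--         if not any(b in low for b in BLACKLIST):
--             if best_clean is None or r < best_clean[0]:
--                 best_clean = (r, mid)
--     if best_clean is not None:
--         return best_clean[1]
--     return best_all[1] if best_all is not None else None
-- ===== Notes on version B (the rewrite author's own statement) =====
-- stated objective: alternative
-- what changed: Replaces A's two-stage filter-then-nested-keyword-scan (k passes over the filtered list plus a filtered[0] fallback) with a single left-to-right pass that keeps the first minimal-priority-rank candidate among non-blacklisted ids and among all ids (fallback), returning the clean candidate if one exists.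
import Mathlib
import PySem

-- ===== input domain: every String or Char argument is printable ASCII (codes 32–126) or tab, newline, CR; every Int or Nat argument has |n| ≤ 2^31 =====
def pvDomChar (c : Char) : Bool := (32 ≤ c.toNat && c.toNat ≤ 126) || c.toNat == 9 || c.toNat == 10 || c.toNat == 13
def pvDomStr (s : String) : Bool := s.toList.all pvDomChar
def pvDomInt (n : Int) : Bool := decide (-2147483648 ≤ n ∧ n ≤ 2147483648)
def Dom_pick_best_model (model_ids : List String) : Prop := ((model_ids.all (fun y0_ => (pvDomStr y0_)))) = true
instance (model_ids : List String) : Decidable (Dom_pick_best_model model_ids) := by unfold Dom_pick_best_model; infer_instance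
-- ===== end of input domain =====

-- B replaces A's filter-then-nested-keyword-scan with one single pass that keeps the
-- first minimal-rank candidate among clean ids and among all ids (fallback); same result.

def PRIORITY_KEYWORDS : List String := ["llama-4", "llama-3", "mistral", "gemma", "openchat", "instruct", "chat"]
def BLACKLIST : List String := ["embed", "embedding", "vision", "whisper", "tts", "audio", "moderation"]

-- ===== PORT A =====
-- 'for kw in PRIORITY_KEYWORDS: for mid in filtered: if kw in mid.lower(): return mid'
def pickA_loop (kws : List String) (filtered : List String) : Option String :=
  match kws with
  | [] => none
  | kw :: rest =>
    match filtered.find? (fun mid => PySem.Str.isIn kw (PySem.Str.lower mid)) with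
    | some mid => some mid
    | none => pickA_loop rest filtered

def pick_best_model (model_ids : List String) : Option String :=
  let filtered0 := model_ids.filter (fun mid => !(BLACKLIST.any (fun b => PySem.Str.isIn b (PySem.Str.lower mid))))
  let filtered := if filtered0 = [] then model_ids else filtered0
  match pickA_loop PRIORITY_KEYWORDS filtered with
  | some mid => some mid
  | none => if filtered = [] then none else filtered.head?   -- 'filtered[0] if filtered else None'

-- ===== PORT B =====
-- r = next((i for i, kw in enumerate(PRIORITY_KEYWORDS) if kw in low), len(PRIORITY_KEYWORDS))
def rankB (kws : List String) (low : String) : Nat :=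
  match kws with
  | [] => 0
  | kw :: rest => if PySem.Str.isIn kw low then 0 else 1 + rankB rest low

-- 'if best is None or r < best[0]: best = (r, mid)'
def updB (best : Option (Nat × String)) (r : Nat) (mid : String) : Option (Nat × String) :=
  match best with
  | none => some (r, mid)
  | some (q, m) => if r < q then some (r, mid) else some (q, m)

-- one iteration of B's loop over the state (best_clean, best_all)
def stepB (s : Option (Nat × String) × Option (Nat × String)) (mid : String) :
    Option (Nat × String) × Option (Nat × String) :=
  let low := PySem.Str.lower mid
  let r := rankB PRIORITY_KEYWORDS low
  (if BLACKLIST.any (fun b => PySem.Str.isIn b low) then s.1 else updB s.1 r mid,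
   updB s.2 r mid)

def pick_best_model_alt (model_ids : List String) : Option String :=
  let s := model_ids.foldl stepB (none, none)
  match s.1 with
  | some (_, m) => some m
  | none =>
    match s.2 with
    | some (_, m) => some m
    | none => none

-- ===== PRECONDITION & SPEC =====
def Spec_pick_best_model (model_ids : List String) (out : Option String) : Prop := out = pick_best_model_alt model_ids
instance (model_ids : List String) (out : Option String) : Decidable (Spec_pick_best_model model_ids out) := by unfold Spec_pick_best_model; infer_instance

-- ===== CLAIM (what is proved, stated in full; the proofs are below) =====
def Claim_equal_pick_best_model : Prop := ∀ (model_ids : List String), Dom_pick_best_model model_ids → Spec_pick_best_model model_ids (pick_best_model model_ids)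

-- ===== LEMMAS AND PROOFS =====

def keyB (mid : String) : Nat := rankB PRIORITY_KEYWORDS (PySem.Str.lower mid)

def cleanB (mid : String) : Bool := !(BLACKLIST.any (fun b => PySem.Str.isIn b (PySem.Str.lower mid)))

-- first-minimum-by-key selection, as an Option String fold
def minStep (key : String → Nat) (acc : Option String) (x : String) : Option String :=
  match acc with
  | none => some x
  | some m => if key x < key m then some x else some m

def minBy (key : String → Nat) (xs : List String) : Option String :=
  xs.foldl (minStep key) none

-- B's fold splits into the two independent single-option folds
lemma foldl_stepB_split (xs : List String) (c a : Option (Nat × String)) :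
    xs.foldl stepB (c, a) =
      ((xs.filter cleanB).foldl (fun o mid => updB o (keyB mid) mid) c,
       xs.foldl (fun o mid => updB o (keyB mid) mid) a) := by
  induction xs generalizing c a with
  | nil => rfl
  | cons x t ih =>
    simp only [List.foldl_cons, List.filter_cons]
    by_cases hx : cleanB x = true
    · have hb : (BLACKLIST.any (fun b => PySem.Str.isIn b (PySem.Str.lower x))) = false := by
        simpa [cleanB] using hx
      simp only [hx, if_true, stepB, hb, Bool.false_eq_true, if_false, List.foldl_cons]
      exact ih _ _
    · have hb : (BLACKLIST.any (fun b => PySem.Str.isIn b (PySem.Str.lower x))) = true := by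
        simpa [cleanB] using hx
      simp only [hx, Bool.false_eq_true, if_false, stepB, hb, if_true]
      exact ih _ _

-- the paired fold is the plain minBy fold carrying its key alongside
lemma foldl_updB_pairing (key : String → Nat) (xs : List String) (acc : Option String) :
    xs.foldl (fun o mid => updB o (key mid) mid) (acc.map (fun m => (key m, m)))
      = (xs.foldl (minStep key) acc).map (fun m => (key m, m)) := by
  induction xs generalizing acc with
  | nil => rfl
  | cons x t ih =>
    simp only [List.foldl_cons]
    have hstep : updB (acc.map (fun m => (key m, m))) (key x) x
        = (minStep key acc x).map (fun m => (key m, m)) := by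
      cases acc with
      | none => rfl
      | some m =>
        simp only [Option.map_some, updB, minStep]
        by_cases h : key x < key m <;> simp [h]
    rw [hstep, ← ih]

lemma foldl_updB_none (key : String → Nat) (xs : List String) :
    xs.foldl (fun o mid => updB o (key mid) mid) none
      = (minBy key xs).map (fun m => (key m, m)) := by
  simpa using foldl_updB_pairing key xs none

lemma minBy_eq_min? (xs : List String) (key : String → Nat) :
    minBy key xs = PySem.List.min? xs key := by
  unfold minBy PySem.List.min?
  congr 1
  funext acc x
  cases acc <;> rfl

lemma foldl_minStep_some (key : String → Nat) (t : List String) (a : String) :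
    t.foldl (minStep key) (some a) =
      match t.foldl (minStep key) none with
      | none => some a
      | some m => if key m < key a then some m else some a := by
  induction t generalizing a with
  | nil => simp
  | cons y t' ih =>
    simp only [List.foldl_cons, minStep]
    by_cases hya : key y < key a
    · simp only [if_pos hya, ih y]
      cases h' : t'.foldl (minStep key) none with
      | none => simp [hya]
      | some m =>
        by_cases hmy : key m < key y
        · have hma : key m < key a := by omega
          simp [hmy, hma]
        · simp [hmy, hya]
    · simp only [if_neg hya, ih a, ih y]
      cases h' : t'.foldl (minStep key) none with
      | none => simp [hya]
      | some m =>
        by_cases hmy : key m < key y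
        · simp [hmy]
        · have hma : ¬ key m < key a := by omega
          simp [hmy, hma, hya]

lemma minBy_cons (x : String) (t : List String) (key : String → Nat) :
    minBy key (x :: t) =
      match minBy key t with
      | none => some x
      | some m => if key m < key x then some m else some x := by
  unfold minBy
  simp only [List.foldl_cons]
  show t.foldl (minStep key) (minStep key none x) = _
  simp only [minStep]
  exact foldl_minStep_some key t x

lemma minBy_mem (xs : List String) (key : String → Nat) (m : String)
    (h : minBy key xs = some m) : m ∈ xs := by
  rw [minBy_eq_min?] at h
  exact PySem.List.min?_mem h

-- minBy with a constant key returns the first element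
lemma minBy_const (xs : List String) (c : Nat) :
    minBy (fun _ => c) xs = xs.head? := by
  induction xs with
  | nil => rfl
  | cons x t ih =>
    rw [minBy_cons, ih]
    cases t <;> simp

lemma minBy_congr (xs : List String) (k1 k2 : String → Nat)
    (h : ∀ x ∈ xs, k1 x = k2 x) :
    minBy k1 xs = minBy k2 xs := by
  induction xs with
  | nil => rfl
  | cons x t ih =>
    rw [minBy_cons, minBy_cons, ih (fun y hy => h y (List.mem_cons_of_mem _ hy))]
    cases h' : minBy k2 t with
    | none => rfl
    | some m =>
      have hm : m ∈ t := minBy_mem t k2 m h'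
      simp [h x List.mem_cons_self, h m (List.mem_cons_of_mem _ hm)]

lemma minBy_shift (xs : List String) (f : String → Nat) :
    minBy (fun x => 1 + f x) xs = minBy f xs := by
  induction xs with
  | nil => rfl
  | cons x t ih =>
    rw [minBy_cons, minBy_cons, ih]
    cases h' : minBy f t with
    | none => rfl
    | some m =>
      by_cases hmx : f m < f x
      · have : 1 + f m < 1 + f x := by omega
        simp [hmx, this]
      · have : ¬ (1 + f m < 1 + f x) := by omega
        simp [hmx, this]

-- the first element whose key is 0 is the minimum
lemma minBy_first_zero (xs : List String) (key : String → Nat) (m : String)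
    (h : xs.find? (fun x => key x == 0) = some m) :
    minBy key xs = some m := by
  induction xs with
  | nil => simp at h
  | cons x t ih =>
    rw [minBy_cons]
    rw [List.find?_cons] at h
    by_cases hx : key x = 0
    · have hxb : (key x == 0) = true := by simpa using hx
      rw [hxb] at h
      injection h with h2
      subst h2
      cases h' : minBy key t with
      | none => rfl
      | some m' =>
        have hlt : ¬ (key m' < key x) := by omega
        simp [hlt]
    · have hxb : (key x == 0) = false := by simpa using hx
      rw [hxb] at h
      rw [ih h]
      have hm0 : key m = 0 := by
        have := List.find?_some h
        simpa using this
      have : key m < key x := by omega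
      simp [this]

lemma rankB_pred_eq (kw : String) (rest : List String) :
    (fun mid => rankB (kw :: rest) (PySem.Str.lower mid) == 0)
      = (fun mid => PySem.Str.isIn kw (PySem.Str.lower mid)) := by
  funext mid
  by_cases h : PySem.Str.isIn kw (PySem.Str.lower mid) = true
  · have h' : PySem.Chars.isIn kw.toList (PySem.Chars.lower mid.toList) = true := by
      simpa using h
    simp [rankB, h']
  · have h' : PySem.Chars.isIn kw.toList (PySem.Chars.lower mid.toList) = false := by
      simpa using (Bool.not_eq_true _ ▸ h : PySem.Str.isIn kw (PySem.Str.lower mid) = false)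
    simp [rankB, h']

lemma pickA_loop_nil (kws : List String) : pickA_loop kws [] = none := by
  induction kws with
  | nil => rfl
  | cons k r ih => simp [pickA_loop, ih]

-- A's keyword loop plus its filtered[0] fallback is exactly first-minimum-by-rank
lemma loop_eq_minBy (kws : List String) (xs : List String) :
    (match pickA_loop kws xs with
     | some mid => some mid
     | none => xs.head?) =
    minBy (fun mid => rankB kws (PySem.Str.lower mid)) xs := by
  induction kws with
  | nil =>
    simp only [pickA_loop]
    rw [show (fun mid => rankB [] (PySem.Str.lower mid)) = (fun _ => 0) from rfl]
    rw [minBy_const]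
  | cons kw rest ih =>
    simp only [pickA_loop]
    cases hf : xs.find? (fun mid => PySem.Str.isIn kw (PySem.Str.lower mid)) with
    | some m =>
      rw [minBy_first_zero xs _ m (by rw [rankB_pred_eq]; exact hf)]
    | none =>
      rw [minBy_congr xs _ (fun mid => 1 + rankB rest (PySem.Str.lower mid))
            (by intro x hx
                have h' : PySem.Chars.isIn kw.toList (PySem.Chars.lower x.toList) = false := by
                  simpa using List.find?_eq_none.mp hf x hx
                simp [rankB, h']),
          minBy_shift]
      exact ih

-- B equals the staged form: first minimum of the clean ids, else of all ids
lemma alt_eq_minBy (xs : List String) :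
    pick_best_model_alt xs =
      match minBy keyB (xs.filter cleanB) with
      | some m => some m
      | none =>
        match minBy keyB xs with
        | some m => some m
        | none => none := by
  unfold pick_best_model_alt
  rw [foldl_stepB_split, foldl_updB_none, foldl_updB_none]
  cases minBy keyB (xs.filter cleanB) with
  | some m => rfl
  | none =>
    cases minBy keyB xs <;> rfl

lemma minBy_nil_iff (xs : List String) (key : String → Nat) :
    minBy key xs = none ↔ xs = [] := by
  cases xs with
  | nil => simp [minBy]
  | cons x t =>
    rw [minBy_cons]
    constructor
    · intro h; cases h' : minBy key t <;> simp [h'] at h <;> split at h <;> simp_all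
    · intro h; simp at h

-- A's whole selection (loop result, else filtered[0]-or-None) as first-minimum-by-rank
lemma A_combined (xs : List String) :
    (match pickA_loop PRIORITY_KEYWORDS xs with
     | some mid => some mid
     | none => if xs = [] then none else xs.head?) =
    (match minBy keyB xs with
     | some m => some m
     | none => none) := by
  by_cases he : xs = []
  · subst he; simp [pickA_loop_nil, minBy]
  · simp only [if_neg he]
    rw [loop_eq_minBy PRIORITY_KEYWORDS xs]
    have hk : (fun mid => rankB PRIORITY_KEYWORDS (PySem.Str.lower mid)) = keyB := rfl
    rw [hk]
    cases h' : minBy keyB xs with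
    | none => exact absurd ((minBy_nil_iff xs keyB).mp h') he
    | some m => rfl

-- ===== VERDICT (by name: the statement is the Claim_ definition above) =====
theorem pick_best_model_spec : Claim_equal_pick_best_model := by
  intro model_ids _
  unfold Spec_pick_best_model
  rw [alt_eq_minBy]
  unfold pick_best_model
  have hc : (fun mid => !(BLACKLIST.any (fun b => PySem.Str.isIn b (PySem.Str.lower mid)))) = cleanB := rfl
  simp only [hc]
  by_cases he : model_ids.filter cleanB = []
  · simp only [he]
    have h0 : minBy keyB ([] : List String) = none := rfl
    rw [h0]
    exact A_combined model_ids
  · simp only [if_neg he]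
    rw [loop_eq_minBy PRIORITY_KEYWORDS (model_ids.filter cleanB)]
    have hk : (fun mid => rankB PRIORITY_KEYWORDS (PySem.Str.lower mid)) = keyB := rfl
    rw [hk]
    cases h' : minBy keyB (model_ids.filter cleanB) with
    | none => exact absurd ((minBy_nil_iff _ keyB).mp h') he
    | some m => rfl
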